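-- pv_equiv track=rewrite | github.com/StuartTheYellowOne/async_faceit_api | utils/create_data_classes.py | create_class_from_dict
-- ===== SOURCE A (Python) =====
-- def create_class_from_dict(dictionary: dict, class_name: str) -> str:
--     ret = f'class {class_name}:\n'
--     doc_str_params = '    """\n'
--     doc_str_types = ''
--     init_str = '    def __init__(self,\n'
--     init_content_str = '        super().__init__(**kwargs)\n'
--
--     for key, value in dictionary.items():
--         t = type(value)
--         doc_str_params += f'    :param {key}: \n'
--         doc_str_types += f'    :type {key}: {t.__name__}\n'
--         init_str += f'                 {key}: {t.__name__},\n'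
--         init_content_str += f'        self.{key} = {key}\n'
--
--         # if t == bool:
--         # elif t == int:
--         # elif t == str:
--         # elif t == list:
--         # elif t == dict:
--
--     doc_str_types += '    """\n'
--     init_str += '                 **kwargs):\n'
--
--     ret = ret + doc_str_params + doc_str_types + init_str + init_content_str
--     return ret
-- ===== SOURCE B (Python) =====
-- def create_class_from_dict(dictionary: dict, class_name: str) -> str:
--     # Table-driven: the output layout is data (literal lines / per-key line templates),
--     # interpreted by one generic loop into a list of lines, joined once at the end.
--     segments = [
--         ('lit', 'class ' + class_name + ':'),
--         ('lit', '    """'),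
--         ('each', lambda k, t: '    :param ' + k + ': '),
--         ('each', lambda k, t: '    :type ' + k + ': ' + t),
--         ('lit', '    """'),
--         ('lit', '    def __init__(self,'),
--         ('each', lambda k, t: '                 ' + k + ': ' + t + ','),
--         ('lit', '                 **kwargs):'),
--         ('lit', '        super().__init__(**kwargs)'),
--         ('each', lambda k, t: '        self.' + k + ' = ' + k),
--     ]
--     lines = []
--     for kind, payload in segments:
--         if kind == 'lit':
--             lines.append(payload)
--         else:
--             lines.extend(payload(k, type(v).__name__) for k, v in dictionary.items())
--     return '\n'.join(lines) + '\n'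
-- ===== Notes on version B (the rewrite author's own statement) =====
-- stated objective: alternative
-- what changed: Replaces A's hard-coded single pass growing four string accumulators with a table-driven interpreter: the output layout is a data table of segments (literal lines or per-key line templates), one generic loop expands it into a list of lines, and a single '\n'.join assembles the result.
import Mathlib
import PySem

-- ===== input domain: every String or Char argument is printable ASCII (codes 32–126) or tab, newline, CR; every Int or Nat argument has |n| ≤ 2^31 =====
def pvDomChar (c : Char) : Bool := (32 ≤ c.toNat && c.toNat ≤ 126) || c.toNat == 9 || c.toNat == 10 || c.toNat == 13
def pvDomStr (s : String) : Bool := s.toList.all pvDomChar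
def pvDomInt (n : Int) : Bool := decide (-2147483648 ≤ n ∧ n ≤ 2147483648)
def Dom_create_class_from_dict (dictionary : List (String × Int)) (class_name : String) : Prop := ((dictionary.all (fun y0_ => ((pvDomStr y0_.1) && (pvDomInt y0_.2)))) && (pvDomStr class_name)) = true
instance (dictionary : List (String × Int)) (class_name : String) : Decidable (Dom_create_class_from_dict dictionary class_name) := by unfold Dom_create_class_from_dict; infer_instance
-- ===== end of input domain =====

-- B replaces A's hard-coded four-accumulator pass by a table-driven interpreter: the output
-- layout is a data table of segments (literal lines / per-key line templates) expanded into a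
-- list of lines and joined once (objective: alternative decomposition, same cost).

-- ===== PORT A =====
-- A: one pass over dictionary.items() extending four accumulator strings, then concatenation.
-- (all values are Python ints on this domain, so type(value).__name__ is "int")
def create_class_from_dict (dictionary : List (String × Int)) (class_name : String) : String :=
  let ret := "class " ++ class_name ++ ":\n"
  let st := dictionary.foldl
    (fun (acc : String × String × String × String) (kv : String × Int) =>
      let key := kv.1
      (acc.1 ++ "    :param " ++ key ++ ": \n",
       acc.2.1 ++ "    :type " ++ key ++ ": int\n",
       acc.2.2.1 ++ "                 " ++ key ++ ": int,\n",
       acc.2.2.2 ++ "        self." ++ key ++ " = " ++ key ++ "\n"))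
    ("    \"\"\"\n", "", "    def __init__(self,\n", "        super().__init__(**kwargs)\n")
  let doc_str_types := st.2.1 ++ "    \"\"\"\n"
  let init_str := st.2.2.1 ++ "                 **kwargs):\n"
  ret ++ st.1 ++ doc_str_types ++ init_str ++ st.2.2.2

-- ===== PORT B =====
-- B: segment table (literal line or per-key template), generic expansion into lines, one join.
inductive PvSeg
  | lit : String → PvSeg
  | each : (String → String → String) → PvSeg

def pvSegments (class_name : String) : List PvSeg :=
  [ .lit ("class " ++ class_name ++ ":"),
    .lit "    \"\"\"",
    .each (fun k _ => "    :param " ++ k ++ ": "),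
    .each (fun k t => "    :type " ++ k ++ ": " ++ t),
    .lit "    \"\"\"",
    .lit "    def __init__(self,",
    .each (fun k t => "                 " ++ k ++ ": " ++ t ++ ","),
    .lit "                 **kwargs):",
    .lit "        super().__init__(**kwargs)",
    .each (fun k _ => "        self." ++ k ++ " = " ++ k) ]

def create_class_from_dict_alt (dictionary : List (String × Int)) (class_name : String) : String :=
  let lines := (pvSegments class_name).foldl
    (fun (acc : List String) seg =>
      match seg with
      | .lit l => acc ++ [l]
      | .each f => acc ++ dictionary.map (fun kv => f kv.1 "int"))
    []
  PySem.Str.join "\n" lines ++ "\n"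

-- ===== PRECONDITION & SPEC =====
def Spec_create_class_from_dict (dictionary : List (String × Int)) (class_name : String) (out : String) : Prop := out = create_class_from_dict_alt dictionary class_name
instance (dictionary : List (String × Int)) (class_name : String) (out : String) : Decidable (Spec_create_class_from_dict dictionary class_name out) := by unfold Spec_create_class_from_dict; infer_instance

-- ===== CLAIM (what is proved, stated in full; the proofs are below) =====
def Claim_equal_create_class_from_dict : Prop := ∀ (dictionary : List (String × Int)) (class_name : String), Dom_create_class_from_dict dictionary class_name → Spec_create_class_from_dict dictionary class_name (create_class_from_dict dictionary class_name)

-- ===== LEMMAS AND PROOFS =====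

-- the seed of an append-accumulating fold factors out in front
theorem pv_foldl_shift {α : Type} (f : α → String) (t : List α) (s : String) :
    t.foldl (fun x y => x ++ f y) s = s ++ t.foldl (fun x y => x ++ f y) "" := by
  induction t generalizing s with
  | nil => simp
  | cons h t ih =>
    simp only [List.foldl_cons]
    rw [ih (s ++ f h), ih ("" ++ f h)]
    simp [String.append_assoc]

-- same, for the plain append fold underlying String.join
theorem pv_foldl_append_shift (t : List String) (s : String) :
    t.foldl (fun r x => r ++ x) s = s ++ t.foldl (fun r x => r ++ x) "" := by
  induction t generalizing s with
  | nil => simp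
  | cons h t ih =>
    simp only [List.foldl_cons]
    rw [ih (s ++ h), ih ("" ++ h)]
    simp [String.append_assoc]

theorem pv_join_cons (x : String) (l : List String) :
    String.join (x :: l) = x ++ String.join l := by
  simp only [String.join, List.foldl_cons]
  rw [pv_foldl_append_shift]
  simp

theorem pv_join_append (l₁ l₂ : List String) :
    String.join (l₁ ++ l₂) = String.join l₁ ++ String.join l₂ := by
  induction l₁ with
  | nil => simp [String.join]
  | cons h t ih => simp [pv_join_cons, ih, String.append_assoc]

-- an append-accumulating fold is the join of the mapped list
theorem pv_foldl_eq_join {α : Type} (f : α → String) (t : List α) :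
    t.foldl (fun x y => x ++ f y) "" = String.join (t.map f) := by
  induction t with
  | nil => rfl
  | cons h t ih =>
    simp only [List.foldl_cons, List.map_cons, pv_join_cons]
    rw [pv_foldl_shift]
    simp [ih]

-- A's four-accumulator fold splits into four independent folds
theorem pv_fold4_split (l : List (String × Int)) (a b c d : String) :
    l.foldl
      (fun (acc : String × String × String × String) (kv : String × Int) =>
        let key := kv.1
        (acc.1 ++ "    :param " ++ key ++ ": \n",
         acc.2.1 ++ "    :type " ++ key ++ ": int\n",
         acc.2.2.1 ++ "                 " ++ key ++ ": int,\n",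
         acc.2.2.2 ++ "        self." ++ key ++ " = " ++ key ++ "\n"))
      (a, b, c, d)
    = (l.foldl (fun x kv => x ++ ("    :param " ++ kv.1 ++ ": \n")) a,
       l.foldl (fun x kv => x ++ ("    :type " ++ kv.1 ++ ": int\n")) b,
       l.foldl (fun x kv => x ++ ("                 " ++ kv.1 ++ ": int,\n")) c,
       l.foldl (fun x kv => x ++ ("        self." ++ kv.1 ++ " = " ++ kv.1 ++ "\n")) d) := by
  induction l generalizing a b c d with
  | nil => rfl
  | cons hd tl ih =>
    simp only [List.foldl_cons]
    rw [ih]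
    simp [String.append_assoc]

-- joining lines with "\n" and appending a final "\n" = concatenating the lines each suffixed by "\n"
theorem pv_join_newline (a : String) (ls : List String) :
    PySem.Str.join "\n" (a :: ls) ++ "\n" = String.join ((a :: ls).map (· ++ "\n")) := by
  induction ls generalizing a with
  | nil =>
    apply String.ext
    simp [String.join]
  | cons b t ih =>
    have h : PySem.Str.join "\n" (a :: b :: t) = a ++ "\n" ++ PySem.Str.join "\n" (b :: t) := by
      apply String.ext
      simp [PySem.Chars.join_cons_cons]
    rw [h, List.map_cons, pv_join_cons, ← ih b]
    simp [String.append_assoc]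

-- ===== VERDICT (by name: the statement is the Claim_ definition above) =====
theorem create_class_from_dict_spec : Claim_equal_create_class_from_dict := by
  intro dictionary class_name _
  show create_class_from_dict dictionary class_name = create_class_from_dict_alt dictionary class_name
  unfold create_class_from_dict create_class_from_dict_alt pvSegments
  simp only [pv_fold4_split, List.foldl_cons, List.foldl_nil, List.nil_append, List.append_assoc]
  rw [pv_foldl_shift (fun kv : String × Int => "    :param " ++ kv.1 ++ ": \n") dictionary,
      pv_foldl_shift (fun kv : String × Int => "    :type " ++ kv.1 ++ ": int\n") dictionary,
      pv_foldl_shift (fun kv : String × Int => "                 " ++ kv.1 ++ ": int,\n") dictionary,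
      pv_foldl_shift (fun kv : String × Int => "        self." ++ kv.1 ++ " = " ++ kv.1 ++ "\n") dictionary,
      pv_foldl_eq_join, pv_foldl_eq_join, pv_foldl_eq_join, pv_foldl_eq_join]
  simp only [List.cons_append]
  rw [pv_join_newline]
  simp only [List.map_cons, List.map_append, List.map_map, pv_join_cons, pv_join_append, Function.comp_def]
  rw [show (":\n" : String) = ":" ++ "\n" from rfl,
      show ("    \"\"\"\n" : String) = "    \"\"\"" ++ "\n" from rfl,
      show ("    def __init__(self,\n" : String) = "    def __init__(self," ++ "\n" from rfl,
      show ("                 **kwargs):\n" : String) = "                 **kwargs):" ++ "\n" from rfl,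
      show ("        super().__init__(**kwargs)\n" : String) = "        super().__init__(**kwargs)" ++ "\n" from rfl,
      show (": \n" : String) = ": " ++ "\n" from rfl,
      show (": int\n" : String) = ": " ++ ("int" ++ "\n") from rfl,
      show (": int,\n" : String) = ": " ++ ("int" ++ ("," ++ "\n")) from rfl]
  simp [String.append_assoc, show (String.join [] : String) = "" from rfl]
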